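-- pv_equiv track=rewrite | github.com/Evan-Lab/Epitech-third-year | Artificial Intelligence/src/check_winner_point.py | check_point_3
-- ===== SOURCE A (Python) =====
-- def check_point_3(board, friend: int, none: int, optimal_move) -> bool:
--     # Horizontal
--     for y in range(len(board)):
--         for x in range(len(board[y]) - 4):
--             winner, point = 0, 0
--             for i in range(0, 5):
--                 if point == 1 and winner == 0 and board[y][x + i] == none:
--                     break
--                 if point == 1 and winner != 0 and board[y][x + i] == none:
--                     point = 2
--                 if board[y][x + i] == friend:
--                     winner+=1
--                 if point == 0 and board[y][x + i] == none:
--                     point, y_coord, x_coord = 1, y, x + i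
--             if winner == 3 and point == 2:
--                 return True, (y_coord, x_coord)
--
--     # Vertical
--     for y in range(len(board) - 4):
--         for x in range(len(board[y])):
--             winner, point = 0, 0
--             for i in range(0, 5):
--                 if point == 1 and winner == 0 and board[y + i][x] == none:
--                     break
--                 if point == 1 and winner != 0 and board[y + i][x] == none:
--                     point = 2
--                 if board[y + i][x] == friend:
--                     winner+=1
--                 if point == 0 and board[y + i][x] == none:
--                     point, y_coord, x_coord = point+1, y + i, x
--             if winner == 3 and point == 2:
--                 return True, (y_coord, x_coord)
--
--     # Haut gauche -> bas droite
--     for y in range(len(board) - 4):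
--         for x in range(len(board[y]) - 4):
--             winner, point = 0, 0
--             for i in range(0, 5):
--                 if point == 1 and winner == 0 and board[y + i][x + i] == none:
--                     break
--                 if point == 1 and winner != 0 and board[y + i][x + i] == none:
--                     point = 2
--                 if board[y + i][x + i] == friend:
--                         winner+=1
--                 if point == 0 and board[y + i][x + i] == none:
--                         point, y_coord, x_coord = point+1, y + i, x + i
--             if winner == 3 and point == 2:
--                 return True, (y_coord, x_coord)
--
--     # # Haut droite -> bas gauche
--     for y in range(len(board) -4):
--         for x in range(4, len(board[y])):
--             winner, point = 0, 0
--             for i in range(0, 5):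
--                 if point == 1 and winner == 0 and board[y + i][x - i] == none:
--                     break
--                 if point == 1 and winner != 0 and board[y + i][x - i] == none:
--                     point = 2
--                 if board[y + i][x - i] == friend:
--                         winner+=1
--                 if point == 0 and board[y + i][x - i] == none:
--                         point, y_coord, x_coord = point+1, y + i, x - i
--             if winner == 3 and point == 2:
--                 return True, (y_coord, x_coord)
--
--     return False, optimal_move
-- ===== SOURCE B (Python) =====
-- def _windows(board):
--     h = len(board)
--     wins = []
--     for y in range(h):
--         for x in range(len(board[y]) - 4):
--             wins.append([(y, x + i) for i in range(5)])
--     for y in range(h - 4):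
--         for x in range(len(board[y])):
--             wins.append([(y + i, x) for i in range(5)])
--     for y in range(h - 4):
--         for x in range(len(board[y]) - 4):
--             wins.append([(y + i, x + i) for i in range(5)])
--     for y in range(h - 4):
--         for x in range(4, len(board[y])):
--             wins.append([(y + i, x - i) for i in range(5)])
--     return wins
--
--
-- def check_point_3(board, friend: int, none: int, optimal_move) -> bool:
--     for cells in _windows(board):
--         vals = [board[y][x] for y, x in cells]
--         if (vals.count(friend) == 3 and vals.count(none) == 2
--                 and not (vals[0] == none and vals[1] == none)):
--             return True, cells[vals.index(none)]
--     return False, optimal_move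
-- ===== Notes on version B (the rewrite author's own statement) =====
-- stated objective: simpler
-- what changed: B replaces A's four copies of a stateful inner loop (winner/point counters, break, late coordinate bookkeeping) by one pass over a precomputed list of all 5-cell windows with a count-based acceptance test: exactly 3 friend cells, exactly 2 empty cells, and the two empties not occupying the first two cells; it returns the first empty cell's coordinates.
-- outside the precondition, e.g. on check_point_3([[1, 1, 1, 0, 0]], 1, 1, (9, 9)): A returns (True, (0, 0)), B returns (False, (9, 9))
import Mathlib
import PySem

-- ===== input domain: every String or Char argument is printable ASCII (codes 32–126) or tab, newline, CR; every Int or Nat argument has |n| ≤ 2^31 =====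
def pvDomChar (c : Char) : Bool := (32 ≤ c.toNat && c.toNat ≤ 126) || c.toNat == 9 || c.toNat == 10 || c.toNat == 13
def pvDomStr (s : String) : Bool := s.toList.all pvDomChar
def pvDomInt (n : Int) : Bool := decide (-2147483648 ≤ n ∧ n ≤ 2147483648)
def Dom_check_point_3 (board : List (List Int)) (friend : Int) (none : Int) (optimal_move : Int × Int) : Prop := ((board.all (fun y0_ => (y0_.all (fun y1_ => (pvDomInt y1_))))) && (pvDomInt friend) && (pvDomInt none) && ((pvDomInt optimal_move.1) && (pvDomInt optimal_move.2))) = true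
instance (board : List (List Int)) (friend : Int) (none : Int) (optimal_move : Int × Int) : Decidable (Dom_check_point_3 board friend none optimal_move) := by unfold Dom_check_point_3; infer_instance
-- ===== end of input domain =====

-- B replaces A's four stateful winner/point/break inner loops by one scan over a precomputed
-- list of all 5-cell windows with a count-based acceptance test (objective: simpler).


-- ===== PORT A =====
-- board[y][x] (valid under Pre_, where Python never raises; getD 0 is only reached outside Pre_)
def pvCellA (board : List (List Int)) (y x : Int) : Int :=
  (PySem.List.pyGet? ((PySem.List.pyGet? board y).getD []) x).getD 0

-- len(board[y])
def pvRowLenA (board : List (List Int)) (y : Int) : Int :=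
  ((PySem.List.pyGet? board y).getD []).length

-- A's inner `for i in range(0, 5)` loop over the window's cell coordinates, state
-- (winner, point, y_coord, x_coord); returning the state unchanged models `break`.
def pvInnerA (board : List (List Int)) (friend nne : Int) :
    List (Int × Int) → Int × Int × Int × Int → Int × Int × Int × Int
  | [], st => st
  | p :: rest, (winner, point, yc, xc) =>
    let c := pvCellA board p.1 p.2
    if point == 1 && winner == 0 && c == nne then (winner, point, yc, xc)
    else
      let point1 := if point == 1 && winner != 0 && c == nne then 2 else point
      let winner1 := if c == friend then winner + 1 else winner
      if point1 == 0 && c == nne then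
        pvInnerA board friend nne rest (winner1, point1 + 1, p.1, p.2)
      else
        pvInnerA board friend nne rest (winner1, point1, yc, xc)

-- the body shared by A's four direction blocks: run the inner loop, then
-- `if winner == 3 and point == 2: return True, (y_coord, x_coord)`
def pvTryA (board : List (List Int)) (friend nne : Int) (coords : List (Int × Int)) :
    Option (Bool × (Int × Int)) :=
  let st := pvInnerA board friend nne coords (0, 0, 0, 0)
  if st.1 == 3 && st.2.1 == 2 then some (true, (st.2.2.1, st.2.2.2)) else Option.none

def check_point_3 (board : List (List Int)) (friend : Int) (none : Int) (optimal_move : Int × Int) : Bool × (Int × Int) :=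
  -- Horizontal
  match (PySem.List.pyRange 0 (board.length) 1).findSome? (fun y =>
      (PySem.List.pyRange 0 (pvRowLenA board y - 4) 1).findSome? (fun x =>
        pvTryA board friend none ((PySem.List.pyRange 0 5 1).map (fun i => (y, x + i))))) with
  | some r => r
  | Option.none =>
  -- Vertical
  match (PySem.List.pyRange 0 ((board.length : Int) - 4) 1).findSome? (fun y =>
      (PySem.List.pyRange 0 (pvRowLenA board y) 1).findSome? (fun x =>
        pvTryA board friend none ((PySem.List.pyRange 0 5 1).map (fun i => (y + i, x))))) with
  | some r => r
  | Option.none =>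
  -- Haut gauche -> bas droite
  match (PySem.List.pyRange 0 ((board.length : Int) - 4) 1).findSome? (fun y =>
      (PySem.List.pyRange 0 (pvRowLenA board y - 4) 1).findSome? (fun x =>
        pvTryA board friend none ((PySem.List.pyRange 0 5 1).map (fun i => (y + i, x + i))))) with
  | some r => r
  | Option.none =>
  -- Haut droite -> bas gauche
  match (PySem.List.pyRange 0 ((board.length : Int) - 4) 1).findSome? (fun y =>
      (PySem.List.pyRange 4 (pvRowLenA board y) 1).findSome? (fun x =>
        pvTryA board friend none ((PySem.List.pyRange 0 5 1).map (fun i => (y + i, x - i))))) with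
  | some r => r
  | Option.none => (false, optimal_move)

-- ===== PORT B =====
def pvCellB (board : List (List Int)) (p : Int × Int) : Int :=
  (PySem.List.pyGet? ((PySem.List.pyGet? board p.1).getD []) p.2).getD 0

-- _windows(board): all 5-cell windows, in A's scan order
def pvWindows (board : List (List Int)) : List (List (Int × Int)) :=
  let h : Int := board.length
  let rl : Int → Int := fun y => ((PySem.List.pyGet? board y).getD []).length
  ((PySem.List.pyRange 0 h 1).flatMap (fun y =>
    (PySem.List.pyRange 0 (rl y - 4) 1).map (fun x =>
      (PySem.List.pyRange 0 5 1).map (fun i => (y, x + i)))))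
  ++ ((PySem.List.pyRange 0 (h - 4) 1).flatMap (fun y =>
    (PySem.List.pyRange 0 (rl y) 1).map (fun x =>
      (PySem.List.pyRange 0 5 1).map (fun i => (y + i, x)))))
  ++ ((PySem.List.pyRange 0 (h - 4) 1).flatMap (fun y =>
    (PySem.List.pyRange 0 (rl y - 4) 1).map (fun x =>
      (PySem.List.pyRange 0 5 1).map (fun i => (y + i, x + i)))))
  ++ ((PySem.List.pyRange 0 (h - 4) 1).flatMap (fun y =>
    (PySem.List.pyRange 4 (rl y) 1).map (fun x =>
      (PySem.List.pyRange 0 5 1).map (fun i => (y + i, x - i)))))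

-- B's window test: 3 friends, 2 empties, empties not at the first two cells; first empty's coords
def pvCheckB (board : List (List Int)) (friend nne : Int) (cells : List (Int × Int)) :
    Option (Bool × (Int × Int)) :=
  let vals := cells.map (pvCellB board)
  if PySem.List.count vals friend == 3 && PySem.List.count vals nne == 2 &&
     !(((PySem.List.pyGet? vals 0).getD 0 == nne) && ((PySem.List.pyGet? vals 1).getD 0 == nne)) then
    match PySem.List.index? vals nne with
    | some j => some (true, (PySem.List.pyGet? cells (j : Int)).getD (0, 0))
    | Option.none => Option.none
  else Option.none

def check_point_3_alt (board : List (List Int)) (friend : Int) (none : Int) (optimal_move : Int × Int) : Bool × (Int × Int) :=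
  match (pvWindows board).findSome? (pvCheckB board friend none) with
  | some r => r
  | Option.none => (false, optimal_move)

-- ===== PRECONDITION & SPEC =====
-- Pre_ excludes (a) boards where, in some 5-row vertical span, a later row is shorter than the
-- span's first row — exactly where A's cross-row window accesses can raise IndexError (A may
-- still return on a few such boards when an earlier window already wins: a slight stated
-- narrowing) — and (b) the degenerate calls with friend == none, where A's acceptance of any
-- window holding exactly three such cells is an accident of its counter logic and B's
-- rejection is equally defensible.
def Pre_check_point_3 (board : List (List Int)) (friend : Int) (none : Int) (optimal_move : Int × Int) : Prop :=
  (∀ y ∈ List.range board.length, y + 4 < board.length →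
      ∀ i ∈ List.range 5, (board.getD y []).length ≤ (board.getD (y + i) []).length) ∧
  friend ≠ none
instance (board : List (List Int)) (friend : Int) (none : Int) (optimal_move : Int × Int) : Decidable (Pre_check_point_3 board friend none optimal_move) := by unfold Pre_check_point_3; infer_instance

def pvWitness_check_point_3 : List (List Int) × Int × Int × (Int × Int) :=
  ([[1, 1, 0, 1, 0], [0, 0, 0, 0, 0]], 1, 0, (0, 0))

def Spec_check_point_3 (board : List (List Int)) (friend : Int) (none : Int) (optimal_move : Int × Int) (out : Bool × (Int × Int)) : Prop := out = check_point_3_alt board friend none optimal_move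
instance (board : List (List Int)) (friend : Int) (none : Int) (optimal_move : Int × Int) (out : Bool × (Int × Int)) : Decidable (Spec_check_point_3 board friend none optimal_move out) := by unfold Spec_check_point_3; infer_instance

-- ===== CLAIM (what is proved, stated in full; the proofs are below) =====
def Claim_equal_check_point_3 : Prop := ∀ (board : List (List Int)) (friend : Int) (none : Int) (optimal_move : Int × Int), Dom_check_point_3 board friend none optimal_move → Pre_check_point_3 board friend none optimal_move → Spec_check_point_3 board friend none optimal_move (check_point_3 board friend none optimal_move)

-- ===== LEMMAS AND PROOFS =====

-- Cells only matter through their classification as friend / empty / other.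
inductive PvCl where
  | F | N | O
deriving DecidableEq

def pvClassify (friend nne v : Int) : PvCl :=
  if v == friend then PvCl.F else if v == nne then PvCl.N else PvCl.O

-- A's inner automaton over classified cells, payload-polymorphic (the payload is what gets
-- recorded at the first empty cell); `Option` replaces A's lazily-initialised y_coord/x_coord.
def pvInnC {α : Type} : List (PvCl × α) → Int × Int × Option α → Int × Int × Option α
  | [], st => st
  | (c, p) :: rest, (winner, point, jo) =>
    if point == 1 && winner == 0 && c == PvCl.N then (winner, point, jo)
    else
      let point1 : Int := if point == 1 && winner != 0 && c == PvCl.N then 2 else point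
      let winner1 : Int := if c == PvCl.F then winner + 1 else winner
      if point1 == 0 && c == PvCl.N then pvInnC rest (winner1, point1 + 1, some p)
      else pvInnC rest (winner1, point1, jo)

def pvRunC {α : Type} (l : List (PvCl × α)) : Option α :=
  let st := pvInnC l (0, 0, Option.none)
  if st.1 == 3 && st.2.1 == 2 then st.2.2 else Option.none

theorem pvClassify_beq_F (friend nne v : Int) :
    (pvClassify friend nne v == PvCl.F) = (v == friend) := by
  by_cases h1 : v = friend
  · simp [pvClassify, h1]
  · by_cases h2 : v = nne <;> simp [pvClassify, h1, h2]

theorem pvClassify_beq_N (friend nne v : Int) (h : friend ≠ nne) :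
    (pvClassify friend nne v == PvCl.N) = (v == nne) := by
  by_cases h1 : v = friend
  · subst h1; simp [pvClassify, h]
  · by_cases h2 : v = nne
    · subst h2
      have h1' : ¬ v = friend := h1
      simp [pvClassify, h1']
    · simp [pvClassify, h1, h2]

-- Bridge: A's concrete inner loop is simulated by the classified automaton.
theorem pvInnerA_innC (board : List (List Int)) (friend nne : Int) (h : friend ≠ nne) :
    ∀ (l : List (Int × Int)) (winner point yc xc : Int) (jo : Option (Int × Int)),
      ((point = 0 ∧ jo = Option.none) ∨ jo = some (yc, xc)) →
      (pvInnC (l.map fun q => (pvClassify friend nne (pvCellA board q.1 q.2), q))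
          (winner, point, jo)).1
        = (pvInnerA board friend nne l (winner, point, yc, xc)).1 ∧
      (pvInnC (l.map fun q => (pvClassify friend nne (pvCellA board q.1 q.2), q))
          (winner, point, jo)).2.1
        = (pvInnerA board friend nne l (winner, point, yc, xc)).2.1 ∧
      (((pvInnerA board friend nne l (winner, point, yc, xc)).2.1 = 0 ∧
          (pvInnC (l.map fun q => (pvClassify friend nne (pvCellA board q.1 q.2), q))
            (winner, point, jo)).2.2 = Option.none) ∨
        (pvInnC (l.map fun q => (pvClassify friend nne (pvCellA board q.1 q.2), q))
            (winner, point, jo)).2.2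
          = some ((pvInnerA board friend nne l (winner, point, yc, xc)).2.2.1,
                  (pvInnerA board friend nne l (winner, point, yc, xc)).2.2.2)) := by
  intro l
  induction l with
  | nil =>
    intro winner point yc xc jo hinv
    exact ⟨rfl, rfl, hinv⟩
  | cons q rest ih =>
    intro winner point yc xc jo hinv
    simp only [List.map_cons, pvInnerA, pvInnC,
      pvClassify_beq_F friend nne, pvClassify_beq_N friend nne _ h]
    by_cases hb1 : (point == 1 && winner == 0 && (pvCellA board q.1 q.2 == nne)) = true
    · rw [if_pos hb1, if_pos hb1]
      exact ⟨rfl, rfl, hinv⟩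
    · rw [if_neg hb1, if_neg hb1]
      by_cases hb2 : (((if (point == 1 && winner != 0 && (pvCellA board q.1 q.2 == nne)) = true
            then (2 : Int) else point) == 0) && (pvCellA board q.1 q.2 == nne)) = true
      · rw [if_pos hb2, if_pos hb2]
        exact ih _ _ _ _ _ (Or.inr rfl)
      · rw [if_neg hb2, if_neg hb2]
        apply ih
        rcases hinv with ⟨hp, hj⟩ | hj
        · subst hp
          refine Or.inl ⟨?_, hj⟩
          simp
        · exact Or.inr hj

theorem pvTryA_runC (board : List (List Int)) (friend nne : Int) (h : friend ≠ nne)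
    (cells : List (Int × Int)) :
    pvTryA board friend nne cells
      = Option.map (fun q => (true, q))
          (pvRunC (cells.map fun q => (pvClassify friend nne (pvCellA board q.1 q.2), q))) := by
  have H := pvInnerA_innC board friend nne h cells 0 0 0 0 Option.none (Or.inl ⟨rfl, rfl⟩)
  unfold pvTryA pvRunC
  rcases hA : pvInnerA board friend nne cells (0, 0, 0, 0) with ⟨w, p, y, x⟩
  rcases hC : pvInnC (cells.map fun q => (pvClassify friend nne (pvCellA board q.1 q.2), q))
      (0, 0, Option.none) with ⟨w', p', jo⟩
  rw [hA, hC] at H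
  rw [hC]
  obtain ⟨hw, hp, hrel⟩ := H
  dsimp only at hw hp hrel ⊢
  subst hw; subst hp
  by_cases hc : (w' == 3 && p' == 2) = true
  · rw [if_pos hc, if_pos hc]
    have hp2 : p' = 2 := beq_iff_eq.mp ((Bool.and_eq_true _ _).mp hc).2
    rcases hrel with ⟨hp0, _⟩ | hj
    · rw [hp0] at hp2; norm_num at hp2
    · simp [hj]
  · rw [if_neg hc, if_neg hc]; rfl

-- The automaton is natural in the payload.
theorem pvInnC_map {α β : Type} (g : α → β) :
    ∀ (l : List (PvCl × α)) (winner point : Int) (jo : Option α),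
      pvInnC (l.map fun cp => (cp.1, g cp.2)) (winner, point, jo.map g)
        = ((pvInnC l (winner, point, jo)).1, (pvInnC l (winner, point, jo)).2.1,
            (pvInnC l (winner, point, jo)).2.2.map g) := by
  intro l
  induction l with
  | nil => intro winner point jo; rfl
  | cons cp rest ih =>
    intro winner point jo
    rcases cp with ⟨c, p⟩
    simp only [List.map_cons, pvInnC]
    by_cases hb1 : (point == 1 && winner == 0 && (c == PvCl.N)) = true
    · rw [if_pos hb1, if_pos hb1]
    · rw [if_neg hb1, if_neg hb1]
      by_cases hb2 : (((if (point == 1 && winner != 0 && (c == PvCl.N)) = true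
            then (2 : Int) else point) == 0) && (c == PvCl.N)) = true
      · rw [if_pos hb2, if_pos hb2]
        have H := ih (if (c == PvCl.F) = true then winner + 1 else winner)
          ((if (point == 1 && winner != 0 && (c == PvCl.N)) = true then (2 : Int) else point) + 1)
          (some p)
        simpa using H
      · rw [if_neg hb2, if_neg hb2]
        exact ih _ _ _

theorem pvRunC_map {α β : Type} (g : α → β) (l : List (PvCl × α)) :
    pvRunC (l.map fun cp => (cp.1, g cp.2)) = (pvRunC l).map g := by
  unfold pvRunC
  have H := pvInnC_map g l 0 0 Option.none
  rcases hC : pvInnC l (0, 0, Option.none) with ⟨w, p, jo⟩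
  rw [hC] at H
  rw [show (Option.none : Option α).map g = Option.none from rfl] at H
  rw [H]
  dsimp only
  by_cases hc : (w == 3 && p == 2) = true
  · rw [if_pos hc, if_pos hc]
  · rw [if_neg hc, if_neg hc]; rfl

-- The 243-case core: A's automaton over a classified 5-window equals B's count-based test.
theorem pvCore (a0 a1 a2 a3 a4 : PvCl) :
    pvRunC (([a0, a1, a2, a3, a4]).zip ([0, 1, 2, 3, 4] : List Nat))
      = (if List.count PvCl.F [a0, a1, a2, a3, a4] == 3 &&
            List.count PvCl.N [a0, a1, a2, a3, a4] == 2 &&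
            !(a0 == PvCl.N && a1 == PvCl.N)
         then List.findIdx? (fun c => c == PvCl.N) [a0, a1, a2, a3, a4]
         else Option.none) := by
  cases a0 <;> cases a1 <;> cases a2 <;> cases a3 <;> cases a4 <;> decide

-- Per-window equivalence of the two ports' window tests.
def pvNth (l : List (Int × Int)) (j : Nat) : Int × Int :=
  (PySem.List.pyGet? l ((j : Nat) : Int)).getD (0, 0)

theorem pvWindowEq (board : List (List Int)) (friend nne : Int) (h : friend ≠ nne)
    (p0 p1 p2 p3 p4 : Int × Int) :
    pvTryA board friend nne [p0, p1, p2, p3, p4]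
      = pvCheckB board friend nne [p0, p1, p2, p3, p4] := by
  rw [pvTryA_runC board friend nne h]
  have hzip : ([p0, p1, p2, p3, p4].map fun q => (pvClassify friend nne (pvCellA board q.1 q.2), q))
      = (([pvClassify friend nne (pvCellB board p0), pvClassify friend nne (pvCellB board p1),
           pvClassify friend nne (pvCellB board p2), pvClassify friend nne (pvCellB board p3),
           pvClassify friend nne (pvCellB board p4)].zip ([0, 1, 2, 3, 4] : List Nat)).map
          fun cp => (cp.1, pvNth [p0, p1, p2, p3, p4] cp.2)) := rfl
  rw [hzip, pvRunC_map (pvNth [p0, p1, p2, p3, p4]), pvCore]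
  unfold pvCheckB
  simp only [List.map_cons, List.map_nil]
  rw [PySem.List.index?_eq_idxOf?]
  simp only [List.idxOf?, PySem.List.count_eq]
  simp only [List.count_cons, List.count_nil, List.findIdx?_cons, List.findIdx?_nil,
    pvClassify_beq_F friend nne, pvClassify_beq_N friend nne _ h]
  rw [show (PySem.List.pyGet? [pvCellB board p0, pvCellB board p1, pvCellB board p2,
        pvCellB board p3, pvCellB board p4] 0).getD 0 = pvCellB board p0 from rfl,
      show (PySem.List.pyGet? [pvCellB board p0, pvCellB board p1, pvCellB board p2,
        pvCellB board p3, pvCellB board p4] 1).getD 0 = pvCellB board p1 from rfl]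
  cases hf0 : (pvCellB board p0 == friend) <;> cases hf1 : (pvCellB board p1 == friend) <;>
  cases hf2 : (pvCellB board p2 == friend) <;> cases hf3 : (pvCellB board p3 == friend) <;>
  cases hf4 : (pvCellB board p4 == friend) <;>
  cases hn0 : (pvCellB board p0 == nne) <;> cases hn1 : (pvCellB board p1 == nne) <;>
  cases hn2 : (pvCellB board p2 == nne) <;> cases hn3 : (pvCellB board p3 == nne) <;>
  cases hn4 : (pvCellB board p4 == nne) <;> rfl

-- findSome? over a flatMap = nested findSome? (not in the library under this form)
theorem pvFindSome?_flatMap {α β γ : Type} (l : List α) (g : α → List β) (f : β → Option γ) :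
    List.findSome? f (l.flatMap g) = List.findSome? (fun a => List.findSome? f (g a)) l := by
  induction l with
  | nil => rfl
  | cons a t ih =>
    rw [List.flatMap_cons, List.findSome?_append, ih]
    cases hfa : List.findSome? f (g a) <;> simp [List.findSome?_cons, hfa, Option.or]

theorem pvRange5 (f : Int → Int × Int) :
    (PySem.List.pyRange 0 5 1).map f = [f 0, f 1, f 2, f 3, f 4] := by
  have h : PySem.List.pyRange 0 5 1 = [0, 1, 2, 3, 4] := by decide
  rw [h]; rfl

theorem pvWindowEq' (board : List (List Int)) (friend nne : Int) (h : friend ≠ nne)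
    (f : Int → Int × Int) :
    pvCheckB board friend nne ((PySem.List.pyRange 0 5 1).map f)
      = pvTryA board friend nne ((PySem.List.pyRange 0 5 1).map f) := by
  rw [pvRange5 f]
  exact (pvWindowEq board friend nne h (f 0) (f 1) (f 2) (f 3) (f 4)).symm

-- ===== VERDICT (by name: the statement is the Claim_ definition above) =====
theorem check_point_3_spec : Claim_equal_check_point_3 := by
  intro board friend nne om hdom hpre
  obtain ⟨-, hfn⟩ := hpre
  unfold Spec_check_point_3 check_point_3 check_point_3_alt pvWindows
  simp only [List.findSome?_append, pvFindSome?_flatMap, List.findSome?_map, Function.comp_def,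
    pvWindowEq' board friend nne hfn, pvRowLenA]
  generalize (List.findSome? (fun y => List.findSome? (fun x => pvTryA board friend nne
    ((PySem.List.pyRange 0 5 1).map fun i => (y, x + i)))
      (PySem.List.pyRange 0 (((PySem.List.pyGet? board y).getD []).length - 4) 1))
    (PySem.List.pyRange 0 (board.length) 1)) = o1
  generalize (List.findSome? (fun y => List.findSome? (fun x => pvTryA board friend nne
    ((PySem.List.pyRange 0 5 1).map fun i => (y + i, x)))
      (PySem.List.pyRange 0 (((PySem.List.pyGet? board y).getD []).length) 1))
    (PySem.List.pyRange 0 ((board.length : Int) - 4) 1)) = o2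
  generalize (List.findSome? (fun y => List.findSome? (fun x => pvTryA board friend nne
    ((PySem.List.pyRange 0 5 1).map fun i => (y + i, x + i)))
      (PySem.List.pyRange 0 (((PySem.List.pyGet? board y).getD []).length - 4) 1))
    (PySem.List.pyRange 0 ((board.length : Int) - 4) 1)) = o3
  generalize (List.findSome? (fun y => List.findSome? (fun x => pvTryA board friend nne
    ((PySem.List.pyRange 0 5 1).map fun i => (y + i, x - i)))
      (PySem.List.pyRange 4 (((PySem.List.pyGet? board y).getD []).length) 1))
    (PySem.List.pyRange 0 ((board.length : Int) - 4) 1)) = o4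
  cases o1 <;> cases o2 <;> cases o3 <;> cases o4 <;> simp [Option.or]
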